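-- pv_equiv track=rewrite | github.com/tylerhoward15/advent-of-code | day9/part1/d9-p1.py | recurse
-- ===== SOURCE A (Python) =====
-- def all_zeroes(nums):
--     for x in nums:
--         if x != 0:
--             return False
--     return True
--
-- def recurse(nums):
--     if all_zeroes(nums):
--         return nums + [0]
--     ret = []
--     for i,_ in enumerate(nums):
--         if i != len(nums)-1:
--             ret.append(nums[i+1]-nums[i])
--     return nums + [nums[-1] + recurse(ret)[-1]]
-- ===== SOURCE B (Python) =====
-- def recurse(nums):
--     # O(n) closed form: next term via the forward-difference (binomial) formula,
--     # next = sum_{k<n} (-1)^(n-1-k) * C(n,k) * nums[k]; A's recursion on difference rows is O(n^2).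
--     n = len(nums)
--     total = 0
--     c = 1                       # running binomial C(n, k)
--     sign = 1 if n % 2 == 1 else -1   # (-1)^(n-1-k), starting at k = 0
--     for k, a in enumerate(nums):
--         total += sign * c * a
--         c = c * (n - k) // (k + 1)
--         sign = -sign
--     return nums + [total]
-- ===== Notes on version B (the rewrite author's own statement) =====
-- stated objective: faster
-- what changed: Replaced the recursive construction of all difference rows (rebuilding a difference list and recursing at every level) by a single O(n) pass that evaluates the closed-form forward-difference extrapolation sum_{k<n} (-1)^(n-1-k)*C(n,k)*nums[k], maintaining the binomial coefficient and sign incrementally.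
import Mathlib
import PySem

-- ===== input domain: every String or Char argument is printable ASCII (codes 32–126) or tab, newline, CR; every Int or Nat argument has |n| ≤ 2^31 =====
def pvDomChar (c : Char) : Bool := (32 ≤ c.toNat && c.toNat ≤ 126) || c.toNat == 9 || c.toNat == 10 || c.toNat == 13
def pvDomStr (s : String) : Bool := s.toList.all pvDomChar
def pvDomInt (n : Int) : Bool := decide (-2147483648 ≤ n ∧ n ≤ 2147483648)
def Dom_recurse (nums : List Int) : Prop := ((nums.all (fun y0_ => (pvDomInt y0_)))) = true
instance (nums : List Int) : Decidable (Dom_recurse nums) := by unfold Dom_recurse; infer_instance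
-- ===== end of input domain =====

-- B replaces A's recursion over difference rows by a single pass evaluating the
-- binomial forward-difference formula; the theorem shows both return the same list.

-- ===== PORT A =====
-- helper all_zeroes: early-return loop becomes structural recursion
def allZeroes : List Int → Bool
  | [] => true
  | x :: xs => if x ≠ 0 then false else allZeroes xs

-- the 'for i,_ in enumerate(nums)' loop building ret; nums[i+1]/nums[i] are always
-- in range under the guard i != len(nums)-1, so pyGetD (default never used) is exact there
def buildRet (nums : List Int) : List Int :=
  (PySem.List.enumerate nums 0).foldl
    (fun ret p =>
      if p.1 ≠ (nums.length : Int) - 1 then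
        ret ++ [PySem.List.pyGetD nums (p.1 + 1) 0 - PySem.List.pyGetD nums p.1 0]
      else ret) []

-- needed by recurse's termination proof (cited in decreasing_by)
theorem buildRet_eq (nums : List Int) :
    buildRet nums
      = (List.range (nums.length - 1)).map
          (fun k => nums.getD (k+1) 0 - nums.getD k 0) := by
  unfold buildRet
  rw [PySem.List.enumerate_eq_map_pyRange (d := 0), PySem.List.pyRange_one,
    List.foldl_map, List.foldl_map]
  simp only [PySem.List.len, sub_zero, Int.toNat_natCast, zero_add]
  rcases Nat.eq_zero_or_pos nums.length with h0 | hpos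
  · simp [h0]
  · obtain ⟨m, hm⟩ : ∃ m, nums.length = m + 1 := ⟨nums.length - 1, by omega⟩
    rw [hm]
    simp only [Nat.add_sub_cancel]
    rw [List.range_succ, List.foldl_append, List.foldl_cons, List.foldl_nil,
      if_neg (by push_cast; omega)]
    have hcong : ∀ (acc : List Int) (k : ℕ), k ∈ List.range m →
        (if ((k : Int)) ≠ ((m + 1 : ℕ) : Int) - 1 then
          acc ++ [PySem.List.pyGetD nums ((k : Int) + 1) 0 - PySem.List.pyGetD nums (k : Int) 0]
        else acc)
          = acc ++ [nums.getD (k+1) 0 - nums.getD k 0] := by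
      intro acc k hk
      rw [List.mem_range] at hk
      rw [if_pos (by push_cast; omega)]
      rw [show ((k : Int) + 1) = ((k+1 : ℕ) : Int) by push_cast; ring]
      rw [PySem.List.pyGetD_natCast, PySem.List.pyGetD_natCast]
    rw [PySem.List.foldl_congr_mem
        (g := fun (acc : List Int) (k : ℕ) => acc ++ [nums.getD (k+1) 0 - nums.getD k 0])
        (h := hcong),
      PySem.List.foldl_append_singleton_eq_map, List.nil_append]

def recurse (nums : List Int) : List Int :=
  if allZeroes nums then nums ++ [0]
  else
    -- nums[-1] and recurse(ret)[-1]: both lists are nonempty here, pyGetD exact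
    nums ++ [PySem.List.pyGetD nums (-1) 0
              + PySem.List.pyGetD (recurse (buildRet nums)) (-1) 0]
termination_by nums.length
decreasing_by
  rename_i h
  have hne : nums ≠ [] := by
    intro hnil; rw [hnil] at h; simp [allZeroes] at h
  rw [buildRet_eq]
  simp only [List.length_map, List.length_range]
  cases nums with
  | nil => exact absurd rfl hne
  | cons a l => simp

-- ===== PORT B =====
def recurse_alt (nums : List Int) : List Int :=
  let n : Int := nums.length
  let s0 : Int := if PySem.Int.mod n 2 = 1 then 1 else -1
  let st :=
    (PySem.List.enumerate nums 0).foldl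
      (fun (st : Int × Int × Int) (p : Int × Int) =>
        (st.1 + st.2.2 * st.2.1 * p.2,
         PySem.Int.floordiv (st.2.1 * (n - p.1)) (p.1 + 1),
         -st.2.2))
      (0, 1, s0)
  nums ++ [st.1]

-- ===== PRECONDITION & SPEC =====
def Spec_recurse (nums : List Int) (out : List Int) : Prop := out = recurse_alt nums
instance (nums : List Int) (out : List Int) : Decidable (Spec_recurse nums out) := by unfold Spec_recurse; infer_instance

-- ===== CLAIM (what is proved, stated in full; the proofs are below) =====
def Claim_equal_recurse : Prop := ∀ (nums : List Int), Dom_recurse nums → Spec_recurse nums (recurse nums)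

-- ===== LEMMAS AND PROOFS =====

-- sign (-1)^(x+1) written without powers
def epsSign (x : ℕ) : Int := if x % 2 = 0 then -1 else 1

-- the coefficient (-1)^(n-1-k) * C(n,k) of the forward-difference formula
def Scoef (n k : ℕ) : Int := epsSign (n + k) * (Nat.choose n k)

def Ssum (n : ℕ) (a : ℕ → Int) : Int := ∑ k ∈ Finset.range n, Scoef n k * a k

theorem epsSign_succ (x : ℕ) : epsSign (x+1) = -epsSign x := by
  unfold epsSign; split_ifs <;> omega

theorem epsSign_even (m : ℕ) : epsSign (m + m) = -1 := by
  unfold epsSign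
  have h : (m + m) % 2 = 0 := by omega
  rw [if_pos h]

theorem getD_lt {l : List Int} {k : ℕ} (h : k < l.length) (d : Int) :
    l.getD k d = l[k] := by
  simp [List.getD_eq_getElem?_getD, List.getElem?_eq_getElem h]

-- the binomial recurrence for the extrapolated value: peeling one difference row
theorem key (m : ℕ) (a : ℕ → Int) :
    Ssum (m+1) a = a m + Ssum m (fun k => a (k+1) - a k) := by
  have e2 : ∀ x, epsSign (x+2) = epsSign x := by
    intro x
    rw [show x+2 = (x+1)+1 from rfl, epsSign_succ, epsSign_succ, neg_neg]
  set f : ℕ → Int := fun j => -epsSign (m+j) * (Nat.choose m j : Int) * a j with hf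
  unfold Ssum
  rw [Finset.sum_range_succ']
  have hstep : ∀ k ∈ Finset.range m,
      Scoef (m+1) (k+1) * a (k+1)
        = epsSign (m+k) * (Nat.choose m k : Int) * a (k+1) + f (k+1) := by
    intro k _
    simp only [hf, Scoef]
    have hc : (Nat.choose (m+1) (k+1) : Int)
        = (Nat.choose m k : Int) + (Nat.choose m (k+1) : Int) := by
      rw [Nat.choose_succ_succ]; push_cast; ring
    have he : epsSign (m+1+(k+1)) = epsSign (m+k) := by
      rw [show m+1+(k+1) = (m+k)+2 by ring, e2]
    have he2 : epsSign (m+(k+1)) = -epsSign (m+k) := by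
      rw [show m+(k+1) = (m+k)+1 by ring, epsSign_succ]
    rw [he, hc, he2]; ring
  rw [Finset.sum_congr rfl hstep, Finset.sum_add_distrib]
  have hshift : (∑ k ∈ Finset.range m, f (k+1))
      = (∑ j ∈ Finset.range m, f j) + f m - f 0 := by
    have h' := Finset.sum_range_succ' f m
    have h'' := Finset.sum_range_succ f m
    linarith [h', h'']
  rw [hshift]
  have hfm : f m = a m := by
    simp only [hf]; rw [epsSign_even]; simp
  have hf0 : f 0 = -epsSign m * a 0 := by
    simp only [hf]; simp
  have hs0 : Scoef (m+1) 0 * a 0 = -epsSign m * a 0 := by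
    simp only [Scoef]
    rw [show m+1+0 = m+1 by ring, epsSign_succ]
    simp
  have hr : ∀ k ∈ Finset.range m, Scoef m k * (a (k+1) - a k)
      = epsSign (m+k) * (Nat.choose m k : Int) * a (k+1) + f k := by
    intro k _; simp only [hf, Scoef]; ring
  rw [Finset.sum_congr rfl hr, Finset.sum_add_distrib, hfm, hf0, hs0]
  ring

theorem allZeroes_iff (l : List Int) : allZeroes l = true ↔ ∀ x ∈ l, x = 0 := by
  induction l with
  | nil => simp [allZeroes]
  | cons x xs ih => simp [allZeroes, ih]

-- A computes nums ++ [the forward-difference extrapolation]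
theorem recurse_eq (n : ℕ) : ∀ nums : List Int, nums.length = n →
    recurse nums = nums ++ [Ssum nums.length (fun k => nums.getD k 0)] := by
  induction n using Nat.strong_induction_on with
  | _ n IH =>
    intro nums hlen
    rw [recurse]
    by_cases hz : allZeroes nums = true
    · rw [if_pos hz]
      have hzero : Ssum nums.length (fun k => nums.getD k 0) = 0 := by
        unfold Ssum
        apply Finset.sum_eq_zero
        intro k hk
        rw [Finset.mem_range] at hk
        have hx : nums.getD k 0 = 0 := by
          rw [getD_lt hk]
          exact (allZeroes_iff nums).mp hz _ (List.getElem_mem hk)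
        dsimp only
        rw [hx, mul_zero]
      rw [hzero]
    · rw [if_neg hz]
      have hne : nums ≠ [] := by
        intro hnil; rw [hnil] at hz; exact hz rfl
      obtain ⟨m, hm⟩ : ∃ m, nums.length = m + 1 := by
        cases nums with
        | nil => exact absurd rfl hne
        | cons a l => exact ⟨l.length, rfl⟩
      have hret := buildRet_eq nums
      have hretlen : (buildRet nums).length = m := by
        rw [hret]; simp [hm]
      have hrec := IH m (by omega) (buildRet nums) hretlen
      rw [hrec, PySem.List.pyGetD_neg_one_append_singleton,
        PySem.List.pyGetD_neg_one nums 0 hne]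
      have hsum : Ssum (buildRet nums).length (fun k => (buildRet nums).getD k 0)
          = Ssum m (fun k => nums.getD (k+1) 0 - nums.getD k 0) := by
        rw [hretlen]
        unfold Ssum
        apply Finset.sum_congr rfl
        intro k hk
        rw [Finset.mem_range] at hk
        dsimp only
        congr 1
        rw [hret, getD_lt (by simp [hm]; omega)]
        simp [hm]
      have hlast : nums.getLast hne = nums.getD m 0 := by
        rw [List.getLast_eq_getElem, getD_lt (by omega)]
        congr 1
        omega
      rw [hsum, hlast, hm, key]
theorem choose_floordiv (n k : ℕ) (hkn : k < n) :
    PySem.Int.floordiv ((Nat.choose n k : Int) * ((n : Int) - (k : Int))) ((k : Int) + 1)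
      = (Nat.choose n (k+1) : Int) := by
  rw [show ((n : Int) - (k : Int)) = ((n - k : ℕ) : Int) by
        rw [Nat.cast_sub (le_of_lt hkn)],
    show ((Nat.choose n k : Int) * ((n - k : ℕ) : Int)) = ((Nat.choose n k * (n - k) : ℕ) : Int) by
        push_cast; ring,
    show ((k : Int) + 1) = ((k+1 : ℕ) : Int) by push_cast; ring,
    PySem.Int.floordiv_natCast]
  congr 1
  rw [← Nat.choose_succ_right_eq]
  exact Nat.mul_div_cancel _ (Nat.succ_pos k)

-- B's fold invariant: the state is (partial sum, C(n,k), (-1)^(n-1-k))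
theorem foldB (n : ℕ) : ∀ (l : List Int) (k : ℕ) (t : Int), k + l.length = n →
    ((PySem.List.enumerate l (k : Int)).foldl
      (fun (st : Int × Int × Int) (p : Int × Int) =>
        (st.1 + st.2.2 * st.2.1 * p.2,
         PySem.Int.floordiv (st.2.1 * ((n : Int) - p.1)) (p.1 + 1),
         -st.2.2))
      (t, (Nat.choose n k : Int), epsSign (n + k))).1
    = t + ∑ j ∈ Finset.range l.length, Scoef n (k + j) * l.getD j 0 := by
  intro l
  induction l with
  | nil => intro k t _; simp [PySem.List.enumerate_nil]
  | cons x xs ih =>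
    intro k t hlen
    rw [PySem.List.enumerate_cons, List.foldl_cons]
    dsimp only
    have hkn : k < n := by
      simp only [List.length_cons] at hlen; omega
    rw [choose_floordiv n k hkn,
      show -epsSign (n + k) = epsSign (n + (k+1)) by
        rw [show n+(k+1) = (n+k)+1 by ring, epsSign_succ],
      show ((k : Int) + 1) = ((k+1 : ℕ) : Int) by push_cast; ring,
      ih (k+1) (t + epsSign (n+k) * (Nat.choose n k : Int) * x)
        (by simp only [List.length_cons] at hlen; omega)]
    rw [List.length_cons, Finset.sum_range_succ']
    simp only [List.getD_cons_succ, List.getD_cons_zero, Nat.add_zero]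
    have hre : (∑ j ∈ Finset.range xs.length, Scoef n (k+(j+1)) * xs.getD j 0)
        = ∑ j ∈ Finset.range xs.length, Scoef n (k+1+j) * xs.getD j 0 :=
      Finset.sum_congr rfl (fun j _ => by rw [show k+(j+1) = k+1+j by ring])
    rw [hre]
    simp only [Scoef]
    ring

theorem alt_eq (nums : List Int) :
    recurse_alt nums = nums ++ [Ssum nums.length (fun k => nums.getD k 0)] := by
  unfold recurse_alt
  dsimp only
  have hs0 : (if PySem.Int.mod (nums.length : Int) 2 = 1 then (1:Int) else -1)
      = epsSign nums.length := by
    rw [PySem.Int.mod_eq_emod_of_pos (by norm_num)]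
    unfold epsSign
    split_ifs <;> omega
  rw [hs0]
  have hfold := foldB nums.length nums 0 0 (by simp)
  simp only [Nat.choose_zero_right, Nat.cast_one, Nat.cast_zero, Nat.add_zero,
    zero_add] at hfold
  rw [hfold]
  unfold Ssum
  simp

-- ===== VERDICT (by name: the statement is the Claim_ definition above) =====
theorem recurse_spec : Claim_equal_recurse := by
  intro nums _
  unfold Spec_recurse
  rw [recurse_eq nums.length nums rfl, alt_eq]
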